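-- pv_equiv track=rewrite | github.com/pietbarber/Manage2Soar | analytics/queries.py | _stack_by_weekday
-- ===== SOURCE A (Python) =====
-- from typing import Any, Dict, List, TypedDict
--
-- WEEKDAYS_ORDER = [2, 3, 4, 5, 6, 7, 1]
--
-- WEEKDAYS_LABELS = ["Mon", "Tue", "Wed", "Thu", "Fri", "Sat", "Sun"]
--
-- def _stack_by_weekday(rows, id_order):
--     """
--     rows: iterable of dicts with keys ("member_id", "wday", "n")
--     id_order: list of member ids in desired display order
--     returns: matrix { "Mon":[...], "Tue":[...], ... } aligned to id_order
--     """
--     # build quick lookup: counts[(member_id, wday)] -> n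
--     counts = {}
--     for r in rows:
--         counts[(r["member_id"], r["wday"])] = int(r["n"])
--
--     matrix: Dict[str, List[int]] = {lbl: [] for lbl in WEEKDAYS_LABELS}
--     for mid in id_order:
--         for w_idx, lbl in zip(WEEKDAYS_ORDER, WEEKDAYS_LABELS):
--             matrix[lbl].append(counts.get((mid, w_idx), 0))
--     return matrix
-- ===== SOURCE B (Python) =====
-- WEEKDAYS_ORDER = [2, 3, 4, 5, 6, 7, 1]
--
-- WEEKDAYS_LABELS = ["Mon", "Tue", "Wed", "Thu", "Fri", "Sat", "Sun"]
--
--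
-- def _stack_by_weekday(rows, id_order):
--     """Single-pass scatter: preallocate zero-filled columns, then write each
--     row's count directly into its (label, column) slot."""
--     # positions of each member id in the display order (a member id may repeat)
--     pos = {}
--     for i, mid in enumerate(id_order):
--         pos.setdefault(mid, []).append(i)
--
--     lbl_of = dict(zip(WEEKDAYS_ORDER, WEEKDAYS_LABELS))
--
--     matrix = {lbl: [0] * len(id_order) for lbl in WEEKDAYS_LABELS}
--     for r in rows:
--         lbl = lbl_of.get(r["wday"])
--         if lbl is None:
--             continue
--         n = int(r["n"])
--         for i in pos.get(r["member_id"], []):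
--             # plain assignment: later rows for the same (mid, wday) win,
--             # exactly like the counts-dict overwrite in the original
--             matrix[lbl][i] = n
--     return matrix
-- ===== Notes on version B (the rewrite author's own statement) =====
-- stated objective: alternative
-- what changed: Replaced the counts-dict build followed by a 7-per-member lookup loop with a single-pass scatter: columns are preallocated to zeros and each row writes its count directly at its member's positions via a precomputed id->indices map and a wday->label map.
import Mathlib
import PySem

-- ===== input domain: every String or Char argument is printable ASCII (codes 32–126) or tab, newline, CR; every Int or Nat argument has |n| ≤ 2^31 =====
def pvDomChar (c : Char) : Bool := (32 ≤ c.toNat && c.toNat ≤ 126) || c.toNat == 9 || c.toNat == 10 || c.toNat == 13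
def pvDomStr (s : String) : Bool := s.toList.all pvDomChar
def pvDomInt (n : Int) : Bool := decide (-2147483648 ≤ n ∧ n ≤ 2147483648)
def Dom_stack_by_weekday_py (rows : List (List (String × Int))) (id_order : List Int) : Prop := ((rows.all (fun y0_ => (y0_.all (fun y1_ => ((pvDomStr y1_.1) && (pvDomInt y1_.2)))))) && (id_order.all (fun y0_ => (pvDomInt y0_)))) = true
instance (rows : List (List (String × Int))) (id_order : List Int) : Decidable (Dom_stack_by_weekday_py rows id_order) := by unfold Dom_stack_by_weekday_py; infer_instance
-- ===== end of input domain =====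

-- B replaces the build-counts-then-look-up-7×M scheme by a single-pass scatter into
-- preallocated zero columns (alternative decomposition, similar cost).

-- ===== PORT A =====
-- module constants WEEKDAYS_ORDER / WEEKDAYS_LABELS
def pvWeekOrder : List Int := [2, 3, 4, 5, 6, 7, 1]
def pvWeekLabels : List String := ["Mon", "Tue", "Wed", "Thu", "Fri", "Sat", "Sun"]

-- r[k] for a row dict; Python raises KeyError when k is absent — Pre_ excludes that, the 0 default is never reached inside Pre_
def pvRowGet (r : List (String × Int)) (k : String) : Int :=
  ((PySem.Dict.mk r).get? k).getD 0

-- counts[(r["member_id"], r["wday"])] = int(r["n"])  (int() is the identity on int)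
def pvCountsA (rows : List (List (String × Int))) : PySem.Dict (Int × Int) Int :=
  rows.foldl (fun c r => c.insert (pvRowGet r "member_id", pvRowGet r "wday") (pvRowGet r "n"))
    PySem.Dict.empty

-- {lbl: [] for lbl in WEEKDAYS_LABELS}
def pvInitA : PySem.Dict String (List Int) :=
  pvWeekLabels.foldl (fun m lbl => m.insert lbl []) PySem.Dict.empty

-- the inner 'for w_idx, lbl in zip(...): matrix[lbl].append(...)'
def pvInnerA (counts : PySem.Dict (Int × Int) Int) (m : PySem.Dict String (List Int))
    (mid : Int) : PySem.Dict String (List Int) :=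
  (pvWeekOrder.zip pvWeekLabels).foldl
    (fun m wl => m.modify wl.2 [] (fun xs => xs ++ [counts.getD (mid, wl.1) 0])) m

def stack_by_weekday_py (rows : List (List (String × Int))) (id_order : List Int) :
    List (String × List Int) :=
  (id_order.foldl (pvInnerA (pvCountsA rows)) pvInitA).items

-- ===== PORT B =====
-- pos: member id -> list of its positions in id_order (setdefault/append loop over enumerate)
def pvPosB (id_order : List Int) : PySem.Dict Int (List Int) :=
  ((PySem.List.enumerate id_order 0).map (fun p => (p.2, p.1))).foldl
    (fun d p => d.modify p.1 [] (fun xs => xs ++ [p.2])) PySem.Dict.empty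

-- dict(zip(WEEKDAYS_ORDER, WEEKDAYS_LABELS))
def pvLblOf : PySem.Dict Int String :=
  (pvWeekOrder.zip pvWeekLabels).foldl (fun d wl => d.insert wl.1 wl.2) PySem.Dict.empty

-- {lbl: [0]*len(id_order) for lbl in WEEKDAYS_LABELS}
def pvInitB (k : Nat) : PySem.Dict String (List Int) :=
  pvWeekLabels.foldl (fun m lbl => m.insert lbl (List.replicate k 0)) PySem.Dict.empty

-- one row: look up its label, then scatter n into the member's positions
def pvStepB (pos : PySem.Dict Int (List Int)) (m : PySem.Dict String (List Int))
    (r : List (String × Int)) : PySem.Dict String (List Int) :=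
  match pvLblOf.get? (pvRowGet r "wday") with
  | none => m
  | some lbl =>
    (pos.getD (pvRowGet r "member_id") []).foldl
      (fun m i => m.modify lbl [] (fun xs => PySem.List.pySetD xs i (pvRowGet r "n"))) m

def stack_by_weekday_py_alt (rows : List (List (String × Int))) (id_order : List Int) :
    List (String × List Int) :=
  (rows.foldl (pvStepB (pvPosB id_order)) (pvInitB id_order.length)).items

-- ===== PRECONDITION & SPEC =====
-- Pre_: every row carries the keys "member_id", "wday" and "n" — Python A raises KeyError otherwise
def Pre_stack_by_weekday_py (rows : List (List (String × Int))) (id_order : List Int) : Prop :=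
  ∀ r ∈ rows, (PySem.Dict.mk r).contains "member_id" = true ∧
    (PySem.Dict.mk r).contains "wday" = true ∧ (PySem.Dict.mk r).contains "n" = true

instance (rows : List (List (String × Int))) (id_order : List Int) :
    Decidable (Pre_stack_by_weekday_py rows id_order) := by
  unfold Pre_stack_by_weekday_py; infer_instance

def pvWitness_stack_by_weekday_py : (List (List (String × Int))) × List Int :=
  ([[("member_id", 1), ("wday", 2), ("n", 3)]], [1, 4])

def Spec_stack_by_weekday_py (rows : List (List (String × Int))) (id_order : List Int)
    (out : List (String × List Int)) : Prop := out = stack_by_weekday_py_alt rows id_order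
instance (rows : List (List (String × Int))) (id_order : List Int) (out : List (String × List Int)) :
    Decidable (Spec_stack_by_weekday_py rows id_order out) := by
  unfold Spec_stack_by_weekday_py; infer_instance

-- ===== CLAIM (what is proved, stated in full; the proofs are below) =====
def Claim_equal_stack_by_weekday_py : Prop := ∀ (rows : List (List (String × Int))) (id_order : List Int), Dom_stack_by_weekday_py rows id_order → Pre_stack_by_weekday_py rows id_order → Spec_stack_by_weekday_py rows id_order (stack_by_weekday_py rows id_order)

-- ===== LEMMAS AND PROOFS =====

-- the value both sides agree on: the n of the LAST row hitting (mid, w), else 0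
def pvOvr (mid w : Int) (a : Int) (r : List (String × Int)) : Int :=
  if pvRowGet r "member_id" = mid ∧ pvRowGet r "wday" = w then pvRowGet r "n" else a

-- the literal value of WEEKDAYS_ORDER zipped with WEEKDAYS_LABELS
lemma zipWeek_eq : pvWeekOrder.zip pvWeekLabels =
    [((2 : Int), "Mon"), (3, "Tue"), (4, "Wed"), (5, "Thu"), (6, "Fri"), (7, "Sat"), (1, "Sun")] := rfl

-- ---- A side ----
lemma countsA_getD (rows : List (List (String × Int))) (c : PySem.Dict (Int × Int) Int)
    (mid w : Int) :
    (rows.foldl (fun c r => c.insert (pvRowGet r "member_id", pvRowGet r "wday") (pvRowGet r "n")) c).getD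
        (mid, w) 0 = rows.foldl (pvOvr mid w) (c.getD (mid, w) 0) := by
  induction rows generalizing c with
  | nil => rfl
  | cons r rows ih =>
    simp only [List.foldl_cons, ih, PySem.Dict.getD_insert, Prod.mk.injEq]
    congr 1
    by_cases h1 : pvRowGet r "member_id" = mid <;> by_cases h2 : pvRowGet r "wday" = w <;>
      simp [h1, h2, pvOvr, eq_comm] <;> tauto

lemma innerA_getD (counts : PySem.Dict (Int × Int) Int) (m : PySem.Dict String (List Int))
    (mid : Int) (w : Int) (lbl : String) (h : (w, lbl) ∈ pvWeekOrder.zip pvWeekLabels) :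
    (pvInnerA counts m mid).getD lbl [] = m.getD lbl [] ++ [counts.getD (mid, w) 0] := by
  rw [zipWeek_eq] at h
  unfold pvInnerA
  rw [zipWeek_eq]
  fin_cases h <;> simp [List.foldl, PySem.Dict.getD_modify]

lemma innerA_keys (counts : PySem.Dict (Int × Int) Int) (m : PySem.Dict String (List Int))
    (mid : Int) (h : m.keys = pvWeekLabels) : (pvInnerA counts m mid).keys = pvWeekLabels := by
  unfold pvInnerA
  rw [PySem.Dict.keys_foldl_modify_key, h]
  decide

lemma outerA_getD (ids : List Int) (counts : PySem.Dict (Int × Int) Int)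
    (m : PySem.Dict String (List Int)) (w : Int) (lbl : String)
    (h : (w, lbl) ∈ pvWeekOrder.zip pvWeekLabels) :
    (ids.foldl (pvInnerA counts) m).getD lbl [] =
      m.getD lbl [] ++ ids.map (fun mid => counts.getD (mid, w) 0) := by
  induction ids generalizing m with
  | nil => simp
  | cons mid ids ih => simp [List.foldl_cons, ih, innerA_getD counts _ mid w lbl h]

lemma outerA_keys (ids : List Int) (counts : PySem.Dict (Int × Int) Int)
    (m : PySem.Dict String (List Int)) (h : m.keys = pvWeekLabels) :
    (ids.foldl (pvInnerA counts) m).keys = pvWeekLabels := by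
  induction ids generalizing m with
  | nil => exact h
  | cons mid ids ih => exact ih _ (innerA_keys counts m mid h)

-- ---- the literal wday -> label dict ----
lemma lblOf_eq_mk : pvLblOf = PySem.Dict.mk
    [((2 : Int), "Mon"), (3, "Tue"), (4, "Wed"), (5, "Thu"), (6, "Fri"), (7, "Sat"), (1, "Sun")] := rfl

lemma lblOf_mem_labels (w : Int) (lbl : String) (h : pvLblOf.get? w = some lbl) :
    (w, lbl) ∈ pvWeekOrder.zip pvWeekLabels := by
  rw [lblOf_eq_mk] at h
  simp only [PySem.Dict.get?_mk_cons, beq_iff_eq] at h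
  split_ifs at h with h1 h2 h3 h4 h5 h6 h7 <;>
    first
    | (simp only [Option.some.injEq] at h; subst h; subst_vars; decide)
    | (exfalso; simp [PySem.Dict.get?] at h)

lemma lblOf_mem_labels' (w : Int) (lbl : String) (h : pvLblOf.get? w = some lbl) :
    lbl ∈ pvWeekLabels := by
  have := lblOf_mem_labels _ _ h
  rw [zipWeek_eq] at this
  simp only [List.mem_cons, List.not_mem_nil, or_false, Prod.mk.injEq] at this
  rcases this with ⟨-, rfl⟩|⟨-, rfl⟩|⟨-, rfl⟩|⟨-, rfl⟩|⟨-, rfl⟩|⟨-, rfl⟩|⟨-, rfl⟩ <;> decide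

lemma lblOf_inj (w w' : Int) (lbl : String) (h : pvLblOf.get? w = some lbl)
    (h' : pvLblOf.get? w' = some lbl) : w = w' := by
  have h1 := lblOf_mem_labels w lbl h
  have h2 := lblOf_mem_labels w' lbl h'
  rw [zipWeek_eq] at h1 h2
  simp only [List.mem_cons, List.not_mem_nil, or_false, Prod.mk.injEq] at h1 h2
  rcases h1 with ⟨rfl, rfl⟩|⟨rfl, rfl⟩|⟨rfl, rfl⟩|⟨rfl, rfl⟩|⟨rfl, rfl⟩|⟨rfl, rfl⟩|⟨rfl, rfl⟩ <;>
    simp_all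

-- ---- B side ----
lemma posB_getD (ids : List Int) (mid : Int) :
    (pvPosB ids).getD mid [] =
      ((PySem.List.enumerate ids 0).filter (fun p => p.2 == mid)).map (·.1) := by
  unfold pvPosB
  rw [PySem.Dict.getD_foldl_modify_append]
  simp [List.filter_map, List.map_map, Function.comp_def]

lemma foldl_pySetD_getElem? (v : Int) (J : List Int) (xs : List Int)
    (hJ : ∀ i ∈ J, ∃ k : Nat, i = (k : Int) ∧ k < xs.length) (j : Nat) :
    (J.foldl (fun xs i => PySem.List.pySetD xs i v) xs)[j]? =
      if ((j : Int) ∈ J ∧ j < xs.length) then some v else xs[j]? := by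
  induction J generalizing xs with
  | nil => simp
  | cons i J ih =>
    obtain ⟨k, rfl, hk⟩ := hJ i (by simp)
    rw [List.foldl_cons, PySem.List.pySetD_natCast, ih _ (by
      intro i hi
      obtain ⟨k', hk', hlt⟩ := hJ i (by simp [hi])
      exact ⟨k', hk', by simpa using hlt⟩)]
    simp only [List.length_set, List.getElem?_set, List.mem_cons]
    by_cases hjJ : (j : Int) ∈ J <;> by_cases hjk : j = k <;> by_cases hjl : j < xs.length <;>
      simp_all <;> omega

lemma mem_scatter_indices (ids : List Int) (mid : Int) (j : Nat) :
    ((j : Int) ∈ ((PySem.List.enumerate ids 0).filter (fun p => p.2 == mid)).map (·.1)) ↔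
      ∃ h : j < ids.length, ids[j] = mid := by
  simp only [List.mem_map, List.mem_filter, PySem.List.mem_enumerate_iff]
  constructor
  · rintro ⟨p, ⟨⟨k, hk, rfl⟩, hmid⟩, hj⟩
    simp only [zero_add] at hj hmid ⊢
    have : j = k := by exact_mod_cast hj.symm
    subst this
    exact ⟨hk, by simpa using hmid⟩
  · rintro ⟨hj, hmid⟩
    exact ⟨((j : Int), ids[j]), ⟨⟨j, hj, by simp⟩, by simpa using hmid⟩, rfl⟩

lemma scatter_hJ (ids : List Int) (mid : Int) (f : Int → Int) :
    ∀ i ∈ ((PySem.List.enumerate ids 0).filter (fun p => p.2 == mid)).map (·.1),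
      ∃ k : Nat, i = (k : Int) ∧ k < (ids.map f).length := by
  intro i hi
  simp only [List.mem_map, List.mem_filter, PySem.List.mem_enumerate_iff] at hi
  obtain ⟨p, ⟨⟨k, hk, rfl⟩, -⟩, rfl⟩ := hi
  exact ⟨k, by simp, by simpa using hk⟩

lemma scatter_eq_map (ids : List Int) (f : Int → Int) (mid v : Int) :
    ((((PySem.List.enumerate ids 0).filter (fun p => p.2 == mid)).map (·.1)).foldl
        (fun xs i => PySem.List.pySetD xs i v) (ids.map f)) =
      ids.map (fun m => if m = mid then v else f m) := by
  apply List.ext_getElem?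
  intro j
  rw [foldl_pySetD_getElem? v _ _ (scatter_hJ ids mid f) j]
  by_cases hj : j < ids.length
  · rw [List.getElem?_map, List.getElem?_map]
    simp only [List.length_map, mem_scatter_indices, List.getElem?_eq_getElem hj]
    by_cases hm : ids[j] = mid <;> simp [hm, hj]
  · have h1 : (ids.map f)[j]? = none := by simp [List.getElem?_eq_none_iff]; omega
    have h2 : (ids.map (fun m => if m = mid then v else f m))[j]? = none := by
      simp [List.getElem?_eq_none_iff]; omega
    simp [h1, h2, hj]

lemma keys_foldl_modify_const {α : Type} (J : List α) (m : PySem.Dict String (List Int))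
    (lbl : String) (f : α → List Int → List Int) (h : lbl ∈ m.keys) :
    (J.foldl (fun m i => m.modify lbl [] (f i)) m).keys = m.keys := by
  induction J generalizing m with
  | nil => rfl
  | cons i J ih =>
    have hk : (m.modify lbl [] (f i)).keys = m.keys := by
      rw [PySem.Dict.keys_modify, PySem.Dict.keys_insert_of_contains]
      rw [PySem.Dict.contains_eq_decide_mem_keys]; simp [h]
    rw [List.foldl_cons, ih _ (hk ▸ h), hk]

lemma getD_foldl_modify_ne {α : Type} (J : List α) (m : PySem.Dict String (List Int))
    (lbl lbl' : String) (f : α → List Int → List Int) (h : lbl' ≠ lbl) :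
    (J.foldl (fun m i => m.modify lbl [] (f i)) m).getD lbl' [] = m.getD lbl' [] := by
  induction J generalizing m with
  | nil => rfl
  | cons i J ih => rw [List.foldl_cons, ih, PySem.Dict.getD_modify_of_ne _ _ _ h]

lemma getD_foldl_modify_same {α : Type} (J : List α) (m : PySem.Dict String (List Int))
    (lbl : String) (f : α → List Int → List Int) :
    (J.foldl (fun m i => m.modify lbl [] (f i)) m).getD lbl [] =
      J.foldl (fun xs i => f i xs) (m.getD lbl []) := by
  induction J generalizing m with
  | nil => rfl
  | cons i J ih => rw [List.foldl_cons, ih, PySem.Dict.getD_modify_self]; rfl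

lemma initB_keys (k : Nat) : (pvInitB k).keys = pvWeekLabels := by
  unfold pvInitB
  rw [PySem.Dict.keys_foldl_insert]
  decide

lemma initB_getD (k : Nat) (lbl : String) (h : lbl ∈ pvWeekLabels) :
    (pvInitB k).getD lbl [] = List.replicate k 0 := by
  unfold pvInitB pvWeekLabels
  fin_cases h <;> simp [List.foldl_cons, List.foldl_nil, PySem.Dict.getD_insert]

lemma stepB_keys (pos : PySem.Dict Int (List Int)) (m : PySem.Dict String (List Int))
    (r : List (String × Int)) (h : m.keys = pvWeekLabels) :
    (pvStepB pos m r).keys = pvWeekLabels := by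
  unfold pvStepB
  cases hm : pvLblOf.get? (pvRowGet r "wday") with
  | none => exact h
  | some lbl =>
    rw [keys_foldl_modify_const _ _ _ _ (h ▸ lblOf_mem_labels' _ _ hm), h]

lemma loopB_getD (ids : List Int) (rows : List (List (String × Int)))
    (m : PySem.Dict String (List Int)) (g : Int → Int → Int)
    (hk : m.keys = pvWeekLabels)
    (hg : ∀ w lbl, pvLblOf.get? w = some lbl → m.getD lbl [] = ids.map (fun mid => g mid w)) :
    ∀ w lbl, pvLblOf.get? w = some lbl →
      (rows.foldl (pvStepB (pvPosB ids)) m).getD lbl [] =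
        ids.map (fun mid => rows.foldl (pvOvr mid w) (g mid w)) := by
  induction rows generalizing m g with
  | nil => exact hg
  | cons r rows ih =>
    intro w lbl hl
    have hstep : ∀ w₁ lbl₁, pvLblOf.get? w₁ = some lbl₁ →
        (pvStepB (pvPosB ids) m r).getD lbl₁ [] =
          ids.map (fun mid => pvOvr mid w₁ (g mid w₁) r) := by
      intro w₁ lbl₁ hl₁
      unfold pvStepB
      cases hm : pvLblOf.get? (pvRowGet r "wday") with
      | none =>
        have hne : ¬ pvRowGet r "wday" = w₁ := by rintro rfl; rw [hl₁] at hm; cases hm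
        rw [hg w₁ lbl₁ hl₁]
        simp [pvOvr, hne]
      | some lbl₀ =>
        by_cases hll : lbl₁ = lbl₀
        · subst hll
          have hw : pvRowGet r "wday" = w₁ := lblOf_inj _ _ _ hm hl₁
          rw [getD_foldl_modify_same, hg w₁ lbl₁ hl₁, posB_getD, scatter_eq_map]
          apply List.map_congr_left
          intro mid _
          by_cases hmid : pvRowGet r "member_id" = mid
          · simp [pvOvr, hmid, hw]
          · have : ¬ mid = pvRowGet r "member_id" := fun h => hmid h.symm
            simp [pvOvr, hmid, hw, this]
        · have hne : ¬ pvRowGet r "wday" = w₁ := by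
            rintro rfl; rw [hl₁] at hm; exact hll (Option.some.inj hm)
          rw [getD_foldl_modify_ne _ _ _ _ _ (fun h => hll h), hg w₁ lbl₁ hl₁]
          simp [pvOvr, hne]
    rw [List.foldl_cons]
    rw [ih _ _ (stepB_keys _ _ _ hk) hstep w lbl hl]
    simp [List.foldl_cons]

lemma loopB_keys (pos : PySem.Dict Int (List Int)) (rows : List (List (String × Int)))
    (m : PySem.Dict String (List Int)) (h : m.keys = pvWeekLabels) :
    (rows.foldl (pvStepB pos) m).keys = pvWeekLabels := by
  induction rows generalizing m with
  | nil => exact h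
  | cons r rows ih => exact ih _ (stepB_keys _ _ _ h)

-- ---- assembly ----
lemma final_getD_eq (rows : List (List (String × Int))) (ids : List Int) (w : Int) (lbl : String)
    (hz : (w, lbl) ∈ pvWeekOrder.zip pvWeekLabels) (hl : pvLblOf.get? w = some lbl) :
    (ids.foldl (pvInnerA (pvCountsA rows)) pvInitA).getD lbl [] =
      (rows.foldl (pvStepB (pvPosB ids)) (pvInitB ids.length)).getD lbl [] := by
  rw [outerA_getD ids _ _ w lbl hz]
  have hA0 : pvInitA.getD lbl [] = [] := by
    have := lblOf_mem_labels' _ _ hl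
    unfold pvWeekLabels at this
    fin_cases this <;> decide
  rw [hA0, List.nil_append]
  rw [loopB_getD ids rows _ (fun _ _ => 0) (initB_keys _) ?hg w lbl hl]
  · apply List.map_congr_left
    intro mid _
    unfold pvCountsA
    rw [countsA_getD]
    simp [PySem.Dict.getD_empty]
  case hg =>
    intro w' lbl' hl'
    rw [initB_getD _ _ (lblOf_mem_labels' _ _ hl')]
    simp [List.map_const']

-- ===== VERDICT (by name: the statement is the Claim_ definition above) =====
theorem stack_by_weekday_py_spec : Claim_equal_stack_by_weekday_py := by
  intro rows ids _ _
  unfold Spec_stack_by_weekday_py stack_by_weekday_py stack_by_weekday_py_alt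
  have hAk := outerA_keys ids (pvCountsA rows) pvInitA (by decide)
  have hBk := loopB_keys (pvPosB ids) rows (pvInitB ids.length) (initB_keys _)
  rw [PySem.Dict.items_eq_map_keys _ (by rw [hAk]; decide) [],
      PySem.Dict.items_eq_map_keys _ (by rw [hBk]; decide) [], hAk, hBk]
  apply List.map_congr_left
  intro lbl hmem
  unfold pvWeekLabels at hmem
  fin_cases hmem
  · exact congrArg _ (final_getD_eq rows ids 2 "Mon" (by decide) rfl)
  · exact congrArg _ (final_getD_eq rows ids 3 "Tue" (by decide) rfl)
  · exact congrArg _ (final_getD_eq rows ids 4 "Wed" (by decide) rfl)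
  · exact congrArg _ (final_getD_eq rows ids 5 "Thu" (by decide) rfl)
  · exact congrArg _ (final_getD_eq rows ids 6 "Fri" (by decide) rfl)
  · exact congrArg _ (final_getD_eq rows ids 7 "Sat" (by decide) rfl)
  · exact congrArg _ (final_getD_eq rows ids 1 "Sun" (by decide) rfl)
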